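-- pv_equiv track=rewrite | github.com/titaniumbones/mwp-zotero-tools | packages/zotero-cli/src/zotero_cli/pdf_toc.py | _get_chapters_numeric
-- ===== SOURCE A (Python) =====
-- from typing import Dict, List, Optional, Tuple
--
-- def _get_chapters_numeric(chapter_map: List[Tuple[str, str, int]], target: int) -> List[Tuple[str, int]]:
--     """Find hierarchical chapters for a numeric page label."""
--     # Build numeric entries preserving level
--     numeric_entries = []
--     for title, lbl, level in chapter_map:
--         try:
--             numeric_entries.append((title, int(lbl), level))
--         except (ValueError, TypeError):
--             continue
--
--     if not numeric_entries:
--         return []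
--
--     # Find the nearest preceding entry at each level
--     nearest_by_level: Dict[int, str] = {}
--     for title, page_num, level in numeric_entries:
--         if page_num <= target:
--             nearest_by_level[level] = title
--             # When a new entry at this level appears, clear deeper levels
--             deeper = [k for k in nearest_by_level if k > level]
--             for k in deeper:
--                 del nearest_by_level[k]
--
--     if not nearest_by_level:
--         return []
--
--     return sorted([(title, level) for level, title in nearest_by_level.items()], key=lambda x: x[1])
-- ===== SOURCE B (Python) =====
-- from typing import List, Tuple
--
-- def _get_chapters_numeric(chapter_map: List[Tuple[str, str, int]], target: int) -> List[Tuple[str, int]]: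
--     """Find hierarchical chapters for a numeric page label (single-pass stack)."""
--     stack: List[Tuple[str, int]] = []  # frames (title, level), strictly increasing level
--     for title, lbl, level in chapter_map:
--         try:
--             page = int(lbl)
--         except (ValueError, TypeError):
--             continue
--         if page <= target:
--             while stack and stack[-1][1] > level:
--                 stack.pop()
--             if stack and stack[-1][1] == level:
--                 stack[-1] = (title, level)
--             else:
--                 stack.append((title, level))
--     return stack
-- ===== Notes on version B (the rewrite author's own statement) =====
-- stated objective: alternative
-- what changed: A makes a numeric-filter pass, then builds a dict keyed by level with explicit deletion of deeper keys on every hit, and finally sorts the items by level; B is a single pass over chapter_map maintaining a stack of (title, level) frames that stays strictly increasing by level (pop deeper frames, overwrite an equal-level top, else push), returned directly with no dict and no final sort.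
import Mathlib
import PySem

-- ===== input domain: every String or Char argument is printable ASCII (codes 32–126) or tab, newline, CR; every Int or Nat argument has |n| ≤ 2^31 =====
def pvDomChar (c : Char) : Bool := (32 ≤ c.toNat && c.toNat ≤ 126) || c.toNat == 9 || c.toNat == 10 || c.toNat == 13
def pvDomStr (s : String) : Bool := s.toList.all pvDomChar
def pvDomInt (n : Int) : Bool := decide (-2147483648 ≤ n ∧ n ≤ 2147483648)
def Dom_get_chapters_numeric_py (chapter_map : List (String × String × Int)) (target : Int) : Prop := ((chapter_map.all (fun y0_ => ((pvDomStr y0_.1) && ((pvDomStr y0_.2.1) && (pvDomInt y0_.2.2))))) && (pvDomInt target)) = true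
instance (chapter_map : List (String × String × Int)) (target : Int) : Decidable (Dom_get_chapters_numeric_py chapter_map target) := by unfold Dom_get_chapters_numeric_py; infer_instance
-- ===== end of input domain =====

-- B replaces A's dict-plus-deletions-plus-final-sort with a single pass keeping a stack of
-- (title, level) frames that stays strictly increasing by level, so no sort is needed (objective: alternative).


-- ===== PORT A =====
-- numeric_entries: the try/int(lbl)/except-skip loop (PySem.Int.ofStr? = int(); none = ValueError)
def pvNumA (chapter_map : List (String × String × Int)) : List (String × Int × Int) :=
  chapter_map.foldl (fun acc e =>
    match PySem.Int.ofStr? e.2.1 with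
    | some n => acc ++ [(e.1, n, e.2.2)]
    | none => acc) []

-- one iteration of A's dict loop: insert, collect the deeper keys, delete them
def pvStepA (target : Int) (d : PySem.Dict Int String) (e : String × Int × Int) : PySem.Dict Int String :=
  if e.2.1 ≤ target then
    let d1 := d.insert e.2.2 e.1
    let deeper := d1.keys.filter (fun k => decide (e.2.2 < k))
    deeper.foldl (fun dd k => dd.erase k) d1
  else d

def get_chapters_numeric_py (chapter_map : List (String × String × Int)) (target : Int) : List (String × Int) :=
  let numeric := pvNumA chapter_map
  if numeric = [] then []
  else
    let nearest := numeric.foldl (pvStepA target) PySem.Dict.empty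
    if nearest.items = [] then []
    else PySem.List.sorted (nearest.items.map (fun p => (p.2, p.1))) (fun x => x.2) false

-- ===== PORT B =====
-- one iteration of B's loop; the stack is held TOP-AT-HEAD (Python appends/pops at the end),
-- so the returned result is the fold state reversed
def pvStepB (target : Int) (st : List (String × Int)) (e : String × String × Int) : List (String × Int) :=
  match PySem.Int.ofStr? e.2.1 with
  | none => st
  | some page =>
    if page ≤ target then
      -- while stack and stack[-1][1] > level: stack.pop()
      let st' := st.dropWhile (fun f => decide (e.2.2 < f.2))
      match st' with
      | [] => [(e.1, e.2.2)]
      | f :: rest =>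
        if f.2 = e.2.2 then (e.1, e.2.2) :: rest      -- stack[-1] = (title, level)
        else (e.1, e.2.2) :: f :: rest                 -- stack.append((title, level))
    else st

def get_chapters_numeric_py_alt (chapter_map : List (String × String × Int)) (target : Int) : List (String × Int) :=
  (chapter_map.foldl (pvStepB target) []).reverse

-- ===== PRECONDITION & SPEC =====
def Spec_get_chapters_numeric_py (chapter_map : List (String × String × Int)) (target : Int) (out : List (String × Int)) : Prop := out = get_chapters_numeric_py_alt chapter_map target
instance (chapter_map : List (String × String × Int)) (target : Int) (out : List (String × Int)) : Decidable (Spec_get_chapters_numeric_py chapter_map target out) := by unfold Spec_get_chapters_numeric_py; infer_instance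

-- ===== CLAIM (what is proved, stated in full; the proofs are below) =====
def Claim_equal_get_chapters_numeric_py : Prop := ∀ (chapter_map : List (String × String × Int)) (target : Int), Dom_get_chapters_numeric_py chapter_map target → Spec_get_chapters_numeric_py chapter_map target (get_chapters_numeric_py chapter_map target)

-- ===== LEMMAS AND PROOFS =====

-- the optional int() result of one chapter_map entry
def pvG (e : String × String × Int) : Option (String × Int × Int) :=
  (PySem.Int.ofStr? e.2.1).map (fun n => (e.1, n, e.2.2))

lemma pvNumA_eq (chapter_map : List (String × String × Int)) :
    pvNumA chapter_map = chapter_map.filterMap pvG := by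
  unfold pvNumA
  rw [show (fun (acc : List (String × Int × Int)) (e : String × String × Int) =>
        match PySem.Int.ofStr? e.2.1 with
        | some n => acc ++ [(e.1, n, e.2.2)]
        | none => acc)
      = (fun acc e => acc ++ ((pvG e).toList)) from ?_]
  · rw [PySem.List.foldl_append_eq_flatMap, List.nil_append, List.filterMap_eq_flatMap_toList]
  · funext acc e
    simp only [pvG]
    cases PySem.Int.ofStr? e.2.1 <;> simp

-- folding erase over a list of keys is one filter on the items
lemma pvEraseFold (ks : List Int) (d : PySem.Dict Int String) :
    (ks.foldl (fun dd k => dd.erase k) d).items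
      = d.items.filter (fun p => decide (p.1 ∉ ks)) := by
  induction ks generalizing d with
  | nil => simp
  | cons k ks ih =>
    rw [List.foldl_cons, ih]
    simp only [PySem.Dict.erase, List.filter_filter]
    apply List.filter_congr
    intro p _
    cases h : decide (p.1 = k) <;> simp_all

-- insert-then-keep-(≤ lv) on a strictly key-increasing item list
lemma pvInsertFilter (L : List (Int × String)) (lv : Int) (t : String)
    (hp : L.Pairwise (fun a b => a.1 < b.1)) :
    (if L.any (fun p => p.1 == lv)
      then L.map (fun p => if p.1 == lv then (lv, t) else p)
      else L ++ [(lv, t)]).filter (fun p => decide (p.1 ≤ lv))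
    = L.filter (fun p => decide (p.1 < lv)) ++ [(lv, t)] := by
  induction L with
  | nil => simp
  | cons p L ih =>
    have hhead : ∀ q ∈ L, p.1 < q.1 := fun q hq => (List.pairwise_cons.mp hp).1 q hq
    have htail := (List.pairwise_cons.mp hp).2
    by_cases hpk : p.1 = lv
    · -- head is the key: tail keys are all > lv
      have hnot : ∀ q ∈ L, ¬ (q.1 = lv) := fun q hq h => by
        have := hhead q hq; omega
      simp only [List.any_cons, hpk, beq_self_eq_true, Bool.true_or, if_true]
      simp only [List.map_cons, hpk, beq_self_eq_true, if_true]
      have hmap : L.map (fun q => if q.1 == lv then (lv, t) else q) = L.map id :=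
        List.map_congr_left (fun q hq => by simp [hnot q hq])
      rw [hmap, List.map_id]
      have hLf1 : L.filter (fun q => decide (q.1 ≤ lv)) = [] := by
        rw [List.filter_eq_nil_iff]; intro q hq; have := hhead q hq; simp; omega
      have hLf2 : L.filter (fun q => decide (q.1 < lv)) = [] := by
        rw [List.filter_eq_nil_iff]; intro q hq; have := hhead q hq; simp; omega
      simp [hLf1, hLf2, hpk]
    · simp only [List.any_cons, (by simpa using hpk : (p.1 == lv) = false), Bool.false_or]
      by_cases hc : L.any (fun q => q.1 == lv) = true
      · -- lv is in the tail, so p.1 < lv and the head survives both filters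
        obtain ⟨q, hq, hql⟩ := List.any_eq_true.mp hc
        have hql' : q.1 = lv := by simpa using hql
        have hplt : p.1 < lv := hql' ▸ hhead q hq
        simp only [hc, if_true, List.map_cons, (by simpa using hpk : (p.1 == lv) = false),
          List.filter_cons]
        have := ih htail
        simp only [hc, if_true] at this
        simp only [beq_iff_eq] at this ⊢
        simp [show decide (p.1 ≤ lv) = true by simp; omega,
              show decide (p.1 < lv) = true by simp; omega, this]
      · simp only [hc]
        have := ih htail
        simp only [hc] at this
        simp only [Bool.false_eq_true, if_false] at this ⊢
        rw [List.cons_append, List.filter_cons, List.filter_cons]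
        by_cases hlt : p.1 < lv
        · simp [show decide (p.1 ≤ lv) = true by simp; omega,
                show decide (p.1 < lv) = true by simp; omega, this]
        · simp [show decide (p.1 ≤ lv) = false by simp; omega,
                show decide (p.1 < lv) = false by simp; omega, this]

-- the items after one A-step, on a strictly key-increasing item list
lemma pvStepA_items (target : Int) (d : PySem.Dict Int String) (e : String × Int × Int)
    (hp : d.items.Pairwise (fun a b => a.1 < b.1)) :
    (pvStepA target d e).items
      = if e.2.1 ≤ target
        then d.items.filter (fun p => decide (p.1 < e.2.2)) ++ [(e.2.2, e.1)]
        else d.items := by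
  unfold pvStepA
  by_cases h : e.2.1 ≤ target
  · simp only [h, if_true]
    rw [pvEraseFold]
    rw [List.filter_congr (q := fun p => decide (p.1 ≤ e.2.2)) ?_]
    · -- reduce Dict.insert to its two item-list shapes and apply pvInsertFilter
      have := pvInsertFilter d.items e.2.2 e.1 hp
      simp only [PySem.Dict.insert, PySem.Dict.contains] at *
      by_cases hc : d.items.any (fun p => p.1 == e.2.2) = true <;> simp_all
    · intro p hpmem
      have hk : p.1 ∈ (d.insert e.2.2 e.1).keys := by
        simp only [PySem.Dict.keys]; exact List.mem_map_of_mem hpmem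
      by_cases hle : p.1 ≤ e.2.2
      · simp only [decide_eq_decide]
        constructor <;> intro _
        · simpa using hle
        · simp only [List.mem_filter, decide_eq_true_eq]
          intro ⟨_, hgt⟩; omega
      · simp only [decide_eq_decide]
        constructor
        · intro hnm; exfalso; exact hnm (by simp [List.mem_filter]; exact ⟨hk, by omega⟩)
        · intro h'; omega
  · simp [h]

-- the pop/overwrite/push step on a strictly level-decreasing (top-at-head) stack
lemma pvPopPush (st : List (String × Int)) (t : String) (lv : Int)
    (hp : st.Pairwise (fun a b => b.2 < a.2)) :
    (match st.dropWhile (fun f => decide (lv < f.2)) with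
      | [] => [(t, lv)]
      | f :: rest => if f.2 = lv then (t, lv) :: rest else (t, lv) :: f :: rest)
    = (t, lv) :: st.filter (fun f => decide (f.2 < lv)) := by
  induction st with
  | nil => simp
  | cons f rest ih =>
    have hhead : ∀ q ∈ rest, q.2 < f.2 := fun q hq => (List.pairwise_cons.mp hp).1 q hq
    have htail := (List.pairwise_cons.mp hp).2
    by_cases hgt : lv < f.2
    · rw [List.dropWhile_cons_of_pos (by simpa using hgt)]
      rw [List.filter_cons_of_neg (by simp; omega)]
      exact ih htail
    · rw [List.dropWhile_cons_of_neg (by simpa using hgt)]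
      have hrest : rest.filter (fun q => decide (q.2 < lv)) = rest := by
        rw [List.filter_eq_self]; intro q hq; have := hhead q hq; simp; omega
      by_cases heq : f.2 = lv
      · simp only [heq, if_true, List.filter_cons]
        simp [hrest]
      · simp only [heq, if_false, List.filter_cons]
        simp only [show decide (f.2 < lv) = true from by simp; omega, if_true]
        simp [hrest]

lemma pvStepB_eq (target : Int) (st : List (String × Int)) (e : String × String × Int)
    (hp : st.Pairwise (fun a b => b.2 < a.2)) :
    pvStepB target st e
      = match PySem.Int.ofStr? e.2.1 with
        | none => st
        | some page =>
          if page ≤ target then (e.1, e.2.2) :: st.filter (fun f => decide (f.2 < e.2.2)) else st := by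
  unfold pvStepB
  cases PySem.Int.ofStr? e.2.1 with
  | none => rfl
  | some page =>
    by_cases h : page ≤ target
    · simp only [h, if_true]
      exact pvPopPush st e.1 e.2.2 hp
    · simp [h]

-- the fold invariant: A's dict items are B's stack reversed and swapped, strictly decreasing by level
lemma pvInvariant (target : Int) (cm : List (String × String × Int))
    (d : PySem.Dict Int String) (st : List (String × Int))
    (hd : d.items = st.reverse.map (fun f => (f.2, f.1)))
    (hp : st.Pairwise (fun a b => b.2 < a.2)) :
    (cm.foldl (fun x y => match pvG y with
                | some b => pvStepA target x b
                | none => x) d).items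
      = (cm.foldl (pvStepB target) st).reverse.map (fun f => (f.2, f.1))
    ∧ (cm.foldl (pvStepB target) st).Pairwise (fun a b => b.2 < a.2) := by
  induction cm generalizing d st with
  | nil => exact ⟨hd, hp⟩
  | cons e cm ih =>
    rw [List.foldl_cons, List.foldl_cons]
    have hdp : d.items.Pairwise (fun a b => a.1 < b.1) := by
      rw [hd, List.pairwise_map, List.pairwise_reverse]
      exact hp
    rw [pvStepB_eq target st e hp]
    cases hs : PySem.Int.ofStr? e.2.1 with
    | none =>
      rw [show pvG e = none from by simp [pvG, hs]]
      exact ih d st hd hp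
    | some page =>
      rw [show pvG e = some (e.1, page, e.2.2) from by simp [pvG, hs]]
      by_cases h : page ≤ target
      · simp only [h, if_true]
        apply ih
        · rw [pvStepA_items target d (e.1, page, e.2.2) hdp]
          simp only [h, if_true, hd]
          rw [List.filter_map, List.reverse_cons, List.map_append, ← List.filter_reverse]
          rfl
        · rw [List.pairwise_cons]
          constructor
          · intro q hq
            have := (List.mem_filter.mp hq).2
            simpa using this
          · exact hp.filter _
      · simp only [h, if_false]
        rw [show pvStepA target d (e.1, page, e.2.2) = d from by unfold pvStepA; simp [h]]
        exact ih d st hd hp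

-- ===== VERDICT (by name: the statement is the Claim_ definition above) =====
theorem get_chapters_numeric_py_spec : Claim_equal_get_chapters_numeric_py := by
  unfold Claim_equal_get_chapters_numeric_py
  intro cm target _
  unfold Spec_get_chapters_numeric_py get_chapters_numeric_py get_chapters_numeric_py_alt
  have hfold :
      ((pvNumA cm).foldl (pvStepA target) PySem.Dict.empty).items
        = (cm.foldl (pvStepB target) []).reverse.map (fun f => (f.2, f.1))
      ∧ (cm.foldl (pvStepB target) []).Pairwise (fun a b => b.2 < a.2) := by
    rw [pvNumA_eq, List.foldl_filterMap]
    convert pvInvariant target cm PySem.Dict.empty [] rfl (by simp) using 3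
    congr 1
    funext x y
    cases pvG y <;> rfl
  obtain ⟨hitems, hpw⟩ := hfold
  by_cases h1 : pvNumA cm = []
  · simp only [h1, if_true]
    rw [h1] at hitems
    simp only [List.foldl_nil] at hitems
    have : (cm.foldl (pvStepB target) []).reverse.map (fun f => (f.2, f.1)) = [] := by
      rw [← hitems]; rfl
    rw [List.map_eq_nil_iff, List.reverse_eq_nil_iff] at this
    simp [this]
  · simp only [h1, if_false]
    by_cases h2 : ((pvNumA cm).foldl (pvStepA target) PySem.Dict.empty).items = []
    · simp only [h2, if_true]
      rw [h2] at hitems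
      have := hitems.symm
      rw [List.map_eq_nil_iff, List.reverse_eq_nil_iff] at this
      simp [this]
    · simp only [h2, if_false]
      rw [hitems]
      rw [List.map_map]
      rw [show ((fun p : Int × String => (p.2, p.1)) ∘ (fun f : String × Int => (f.2, f.1)))
            = id from by funext p; rfl, List.map_id]
      apply PySem.List.sorted_eq_self_of_pairwise
      rw [List.pairwise_reverse]
      exact hpw.imp (fun h => le_of_lt h)
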